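-- pv_equiv track=rewrite | github.com/kerBiy/ubb-computer-science | FP/lab 3/3.py | longestPrimIntreEleSubSeq
-- ===== SOURCE A (Python) =====
-- def longestPrimIntreEleSubSeq(nums: list[int]) -> list[int]:
--     max_length, curr_length = 0, 1
--     start_index = start_max = 0
--
--     def cmmdc(a: int, b: int) -> int:
--         if b == 0:
--             return a
--         return cmmdc(b, a % b)
--
--     for i in range(1, len(nums)):
--         if cmmdc(nums[i], nums[i - 1]) == 1:
--             curr_length += 1
--         else:
--             if curr_length > max_length:
--                 max_length = curr_length
--                 start_max = start_index
--
--             curr_length = 1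
--             start_index = i
--
--     if curr_length > max_length:
--         max_length = curr_length
--         start_max = start_index
--
--     return nums[start_max : start_max + max_length]
-- ===== SOURCE B (Python) =====
-- def cmmdc(a: int, b: int) -> int:
--     if b == 0:
--         return a
--     return cmmdc(b, a % b)
--
--
-- def longestPrimIntreEleSubSeq(nums: list[int]) -> list[int]:
--     n = len(nums)
--     breaks = [i for i in range(1, n) if cmmdc(nums[i], nums[i - 1]) != 1]
--     best_len = best_start = 0
--     prev = 0
--     for b in breaks + [n]:
--         if b - prev > best_len:
--             best_len, best_start = b - prev, prev
--         prev = b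
--     return nums[best_start : best_start + best_len]
-- ===== Notes on version B (the rewrite author's own statement) =====
-- stated objective: alternative
-- what changed: Replaces the single running-accumulator scan (max/current length with a post-loop flush) by two separate passes: first collect the break positions where adjacent elements are not coprime, then scan the boundary list (zero, the breaks, then the length) pairwise keeping the first longest segment.
import Mathlib
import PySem

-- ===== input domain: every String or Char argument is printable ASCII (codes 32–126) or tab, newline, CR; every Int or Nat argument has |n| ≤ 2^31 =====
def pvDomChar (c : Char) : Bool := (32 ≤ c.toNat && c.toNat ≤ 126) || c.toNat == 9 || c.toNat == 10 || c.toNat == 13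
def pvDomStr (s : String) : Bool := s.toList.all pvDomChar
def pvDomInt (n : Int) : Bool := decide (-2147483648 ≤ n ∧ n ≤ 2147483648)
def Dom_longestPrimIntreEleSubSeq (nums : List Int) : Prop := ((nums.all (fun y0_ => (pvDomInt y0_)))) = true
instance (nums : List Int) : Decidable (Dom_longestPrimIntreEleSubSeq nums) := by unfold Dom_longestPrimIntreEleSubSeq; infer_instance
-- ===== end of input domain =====

-- B replaces A's running-accumulator scan by a two-pass decomposition (break positions, then a
-- pairwise scan of the boundary list); same cost, equal output on every input (objective: alternative).


-- ===== PORT A =====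

-- termination fact for cmmdc's recursion (Python's % has the divisor's sign, so |a % b| < |b|)
theorem pvModNatAbsLt (a b : Int) (h : b ≠ 0) :
    (PySem.Int.mod a b).natAbs < b.natAbs := by
  rcases lt_or_gt_of_ne h with hb | hb
  · have := PySem.Int.mod_neg_bounds a hb
    omega
  · have h1 := PySem.Int.mod_nonneg a hb
    have h2 := PySem.Int.mod_lt a hb
    omega

-- the recursive gcd helper A defines (B's same-named helper is textually identical)
def cmmdc (a b : Int) : Int :=
  if b = 0 then a
  else cmmdc b (PySem.Int.mod a b)
termination_by b.natAbs
decreasing_by exact pvModNatAbsLt a b (by assumption)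

-- A's loop body: state (max_length, curr_length, start_index, start_max)
def stepA (nums : List Int) (s : Int × Int × Int × Int) (i : Int) : Int × Int × Int × Int :=
  if cmmdc (PySem.List.pyGetD nums i 0) (PySem.List.pyGetD nums (i - 1) 0) = 1 then
    (s.1, s.2.1 + 1, s.2.2.1, s.2.2.2)
  else
    if s.2.1 > s.1 then (s.2.1, 1, i, s.2.2.1) else (s.1, 1, i, s.2.2.2)

-- A's post-loop flush: the final 'if curr_length > max_length' bump, yielding (max_length, start_max)
def finA (s : Int × Int × Int × Int) : Int × Int :=
  if s.2.1 > s.1 then (s.2.1, s.2.2.1) else (s.1, s.2.2.2)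

-- literal port of A: one fold over range(1, len(nums)), then the flush, then the slice
def longestPrimIntreEleSubSeq (nums : List Int) : List Int :=
  let n : Int := nums.length
  let st := (PySem.List.pyRange 1 n 1).foldl (stepA nums) (0, 1, 0, 0)
  let p := finA st
  PySem.List.slice nums (some p.2) (some (p.2 + p.1))

-- ===== PORT B =====

-- B's loop body: state (best_len, best_start, prev)
def stepB (st : Int × Int × Int) (b : Int) : Int × Int × Int :=
  if b - st.2.2 > st.1 then (b - st.2.2, st.2.2, b) else (st.1, st.2.1, b)

-- literal port of B: collect break positions, then scan the boundary pairs of breaks ++ [n]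
def longestPrimIntreEleSubSeq_alt (nums : List Int) : List Int :=
  let n : Int := nums.length
  let breaks :=
    (PySem.List.pyRange 1 n 1).filter
      (fun i => cmmdc (PySem.List.pyGetD nums i 0) (PySem.List.pyGetD nums (i - 1) 0) ≠ 1)
  let s := (breaks ++ [n]).foldl stepB (0, 0, 0)
  PySem.List.slice nums (some s.2.1) (some (s.2.1 + s.1))

-- ===== PRECONDITION & SPEC =====
def Spec_longestPrimIntreEleSubSeq (nums : List Int) (out : List Int) : Prop := out = longestPrimIntreEleSubSeq_alt nums
instance (nums : List Int) (out : List Int) : Decidable (Spec_longestPrimIntreEleSubSeq nums out) := by unfold Spec_longestPrimIntreEleSubSeq; infer_instance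

-- ===== CLAIM (what is proved, stated in full; the proofs are below) =====
def Claim_equal_longestPrimIntreEleSubSeq : Prop := ∀ (nums : List Int), Dom_longestPrimIntreEleSubSeq nums → Spec_longestPrimIntreEleSubSeq nums (longestPrimIntreEleSubSeq nums)

-- ===== LEMMAS AND PROOFS =====

-- key invariant: A's scan from index j (current segment starting at startI, so curr_length = j - startI)
-- followed by the flush equals B's pairwise boundary scan over the remaining breaks plus the closing n
theorem pvKey (nums : List Int) (n : Int) :
    ∀ (k : Nat) (j maxL startI startM : Int), j ≤ n → (n - j).toNat = k →
    finA ((PySem.List.pyRange j n 1).foldl (stepA nums) (maxL, j - startI, startI, startM))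
      = (let r := (((PySem.List.pyRange j n 1).filter
            (fun i => cmmdc (PySem.List.pyGetD nums i 0) (PySem.List.pyGetD nums (i - 1) 0) ≠ 1)
            ++ [n]).foldl stepB (maxL, startM, startI));
         (r.1, r.2.1)) := by
  intro k
  induction k with
  | zero =>
    intro j maxL startI startM hj hk
    have hjn : j = n := by omega
    subst hjn
    rw [PySem.List.pyRange_one_eq_nil (le_refl _)]
    simp only [List.foldl_nil, List.filter_nil, List.nil_append, List.foldl_cons]
    simp only [finA, stepB, gt_iff_lt]
    split_ifs <;> rfl
  | succ k ih =>
    intro j maxL startI startM hj hk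
    have hjn : j < n := by omega
    rw [PySem.List.pyRange_one_cons hjn, List.filter_cons, List.foldl_cons]
    by_cases hc : cmmdc (PySem.List.pyGetD nums j 0) (PySem.List.pyGetD nums (j - 1) 0) = 1
    · have ha : stepA nums (maxL, j - startI, startI, startM) j
          = (maxL, (j + 1) - startI, startI, startM) := by
        simp only [stepA, hc, if_true]
        simp [Prod.ext_iff]; ring
      rw [ha, if_neg (by simpa using hc)]
      exact ih (j + 1) maxL startI startM (by omega) (by omega)
    · have hfil : (decide (cmmdc (PySem.List.pyGetD nums j 0) (PySem.List.pyGetD nums (j - 1) 0) ≠ 1)) = true := by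
        simpa using hc
      rw [if_pos hfil, List.cons_append, List.foldl_cons]
      by_cases hgt : j - startI > maxL
      · rw [show stepA nums (maxL, j - startI, startI, startM) j = (j - startI, 1, j, startI) from by
            simp [stepA, hc, hgt],
          show stepB (maxL, startM, startI) j = (j - startI, startI, j) from by
            simp [stepB, hgt]]
        have h := ih (j + 1) (j - startI) j startI (by omega) (by omega)
        simpa only [add_sub_cancel_left] using h
      · rw [show stepA nums (maxL, j - startI, startI, startM) j = (maxL, 1, j, startM) from by
            simp [stepA, hc, hgt],
          show stepB (maxL, startM, startI) j = (maxL, startM, j) from by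
            simp [stepB, hgt]]
        have h := ih (j + 1) maxL j startM (by omega) (by omega)
        simpa only [add_sub_cancel_left] using h

-- ===== VERDICT (by name: the statement is the Claim_ definition above) =====
theorem longestPrimIntreEleSubSeq_spec : Claim_equal_longestPrimIntreEleSubSeq := by
  intro nums _
  unfold Spec_longestPrimIntreEleSubSeq
  cases nums with
  | nil => decide
  | cons x xs =>
    have hn1 : (1 : Int) ≤ ((x :: xs).length : Int) := by
      simp only [List.length_cons]
      omega
    have hkey := pvKey (x :: xs) ((x :: xs).length : Int)
      ((((x :: xs).length : Int) - 1).toNat) 1 0 0 0 hn1 rfl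
    simp only [sub_zero] at hkey
    simp only [longestPrimIntreEleSubSeq, longestPrimIntreEleSubSeq_alt]
    rw [hkey]
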